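-- pv_equiv track=rewrite | github.com/jvano74/advent_of_code | 2024/2024_21_test.py | validate_instructions
-- ===== SOURCE A (Python) =====
-- def validate_instructions(instructions):
--     for invalid in (
--         "<^<",
--         "<^^<",
--         "<^^^<",
--         "<v<",
--         "<vv<",
--         "<vvv<",
--         ">^>",
--         ">^^>",
--         ">^^^>",
--         ">v>",
--         ">vv>",
--         ">vvv>",
--         "^<^",
--         "^<<^",
--         "^>^",
--         "^>>^",
--         "v<v",
--         "v<<v",
--         "v>v",
--         "v>>v",
--     ):
--         if invalid in instructions:
--             return False
--     return True
-- ===== SOURCE B (Python) =====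
-- def validate_instructions(instructions):
--     # One left-to-right scan with an explicit window matcher ("anchor, run of one
--     # perpendicular mid character, same anchor") instead of 20 substring searches.
--     n = len(instructions)
--     i = 0
--     while i < n:
--         c = instructions[i]
--         if c == "<" or c == ">":
--             cap, mids = 3, "^v"
--         elif c == "^" or c == "v":
--             cap, mids = 2, "<>"
--         else:
--             i += 1
--             continue
--         if i + 1 < n and instructions[i + 1] in mids:
--             m = instructions[i + 1]
--             j = i + 2
--             run = 1
--             while j < n and instructions[j] == m and run < cap:
--                 j += 1
--                 run += 1
--             if j < n and instructions[j] == c: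
--                 return False
--         i += 1
--     return True
-- ===== Notes on version B (the rewrite author's own statement) =====
-- stated objective: alternative
-- what changed: Replaces the 20 independent substring-containment scans over the whole string by a single left-to-right scan that, at each position, matches the one generic window shape (anchor, a run of 1-3 resp. 1-2 copies of one perpendicular direction character, the same anchor) shared by all 20 forbidden patterns.
import Mathlib
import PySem

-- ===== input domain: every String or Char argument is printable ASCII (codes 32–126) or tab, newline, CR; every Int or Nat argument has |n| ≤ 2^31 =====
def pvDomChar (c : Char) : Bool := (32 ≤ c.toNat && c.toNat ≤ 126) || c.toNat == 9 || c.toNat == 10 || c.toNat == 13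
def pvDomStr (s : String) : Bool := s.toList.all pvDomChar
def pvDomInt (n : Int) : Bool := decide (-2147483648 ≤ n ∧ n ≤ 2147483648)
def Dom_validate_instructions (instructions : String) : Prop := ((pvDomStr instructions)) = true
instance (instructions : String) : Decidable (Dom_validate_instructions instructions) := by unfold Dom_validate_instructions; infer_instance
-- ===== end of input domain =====

-- B replaces A's 20 independent substring scans by one left-to-right scan with a
-- generic "anchor / run of one perpendicular char / same anchor" window matcher
-- (objective: alternative single-pass algorithm; equivalence of RETURN values proved).

-- ===== PORT A =====
-- the tuple of forbidden substrings from A, in order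
def pvInvalidPats : List String :=
  ["<^<", "<^^<", "<^^^<", "<v<", "<vv<", "<vvv<",
   ">^>", ">^^>", ">^^^>", ">v>", ">vv>", ">vvv>",
   "^<^", "^<<^", "^>^", "^>>^", "v<v", "v<<v", "v>v", "v>>v"]

-- A's for-loop with early `return False`
def pvALoop : List String → String → Bool
  | [], _ => true
  | p :: ps, s => if PySem.Str.isIn p s then false else pvALoop ps s

def validate_instructions (instructions : String) : Bool :=
  pvALoop pvInvalidPats instructions

-- ===== PORT B =====
-- Source B's inner while loop: advance j while j < n and instructions[j] == m and run < cap
def pvRun (cs : List Char) (m : Char) (cap : Nat) (j : Nat) (run : Nat) : Nat :=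
  if h : j < cs.length ∧ cs.getD j ' ' = m ∧ run < cap then
    pvRun cs m cap (j + 1) (run + 1)
  else j
termination_by cs.length - j
decreasing_by omega

-- the body of Source B's outer loop at index i (False-return condition; `m in mids`
-- transliterated as the corresponding two-character disjunction)
def pvBadAt (cs : List Char) (i : Nat) : Bool :=
  let n := cs.length
  let c := cs.getD i ' '
  if (c = '<' ∨ c = '>') ∨ (c = '^' ∨ c = 'v') then
    let cap : Nat := if c = '<' ∨ c = '>' then 3 else 2
    let m := cs.getD (i + 1) ' '
    let midOk : Prop := if c = '<' ∨ c = '>' then m = '^' ∨ m = 'v' else m = '<' ∨ m = '>'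
    if i + 1 < n ∧ midOk then
      decide (pvRun cs m cap (i + 2) 1 < n) && decide (cs.getD (pvRun cs m cap (i + 2) 1) ' ' = c)
    else false
  else false

-- Source B's outer while loop over i
def pvScan (cs : List Char) (i : Nat) : Bool :=
  if h : i < cs.length then
    if pvBadAt cs i then false else pvScan cs (i + 1)
  else true
termination_by cs.length - i

def validate_instructions_alt (instructions : String) : Bool :=
  pvScan instructions.toList 0

-- ===== PRECONDITION & SPEC =====
def Spec_validate_instructions (instructions : String) (out : Bool) : Prop := out = validate_instructions_alt instructions
instance (instructions : String) (out : Bool) : Decidable (Spec_validate_instructions instructions out) := by unfold Spec_validate_instructions; infer_instance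

-- ===== CLAIM (what is proved, stated in full; the proofs are below) =====
def Claim_equal_validate_instructions : Prop := ∀ (instructions : String), Dom_validate_instructions instructions → Spec_validate_instructions instructions (validate_instructions instructions)

-- ===== LEMMAS AND PROOFS =====

-- the forbidden patterns as character lists
def pvPatsL : List (List Char) :=
  [['<', '^', '<'],
   ['<', '^', '^', '<'],
   ['<', '^', '^', '^', '<'],
   ['<', 'v', '<'],
   ['<', 'v', 'v', '<'],
   ['<', 'v', 'v', 'v', '<'],
   ['>', '^', '>'],
   ['>', '^', '^', '>'],
   ['>', '^', '^', '^', '>'],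
   ['>', 'v', '>'],
   ['>', 'v', 'v', '>'],
   ['>', 'v', 'v', 'v', '>'],
   ['^', '<', '^'],
   ['^', '<', '<', '^'],
   ['^', '>', '^'],
   ['^', '>', '>', '^'],
   ['v', '<', 'v'],
   ['v', '<', '<', 'v'],
   ['v', '>', 'v'],
   ['v', '>', '>', 'v']]

-- suffix-level version of Source B's inner while loop
def pvRunL (m : Char) (cap : Nat) : Nat → List Char → List Char
  | _, [] => []
  | run, x :: xs => if x = m ∧ run < cap then pvRunL m cap (run + 1) xs else x :: xs

-- suffix-level version of pvBadAt
def pvFront : List Char → Bool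
  | c :: x :: rest =>
    if (c = '<' ∨ c = '>') ∨ (c = '^' ∨ c = 'v') then
      let cap : Nat := if c = '<' ∨ c = '>' then 3 else 2
      let midOk : Prop := if c = '<' ∨ c = '>' then x = '^' ∨ x = 'v' else x = '<' ∨ x = '>'
      if midOk then
        match pvRunL x cap 1 rest with
        | y :: _ => decide (y = c)
        | [] => false
      else false
    else false
  | _ => false

theorem pvPatsL_eq : pvInvalidPats.map String.toList = pvPatsL := by decide

theorem pvALoop_iff (ps : List String) (s : String) :
    pvALoop ps s = true ↔ ∀ p ∈ ps, PySem.Chars.isIn p.toList s.toList = false := by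
  induction ps with
  | nil => simp [pvALoop]
  | cons p ps ih =>
    simp only [pvALoop, PySem.Str.isIn_eq]
    by_cases h : PySem.Chars.isIn p.toList s.toList = true
    · rw [if_pos h]
      constructor
      · intro hf; simp at hf
      · intro hall
        have := hall p (List.mem_cons_self ..)
        rw [h] at this; simp at this
    · simp only [Bool.not_eq_true] at h
      rw [if_neg (by simp [h])]
      simp [h, ih]

theorem pvGetD_headD_drop (cs : List Char) (i : Nat) :
    cs.getD i ' ' = (cs.drop i).headD ' ' := by
  simp [List.getD_eq_getElem?_getD, List.headD_eq_head?_getD, List.head?_drop]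

theorem pvRun_drop (cs : List Char) (m : Char) (cap : Nat) :
    ∀ j run, cs.drop (pvRun cs m cap j run) = pvRunL m cap run (cs.drop j) := by
  intro j run
  induction j, run using pvRun.induct cs m cap with
  | case1 j run h ih =>
    obtain ⟨hj, hm, hr⟩ := h
    rw [pvRun, dif_pos ⟨hj, hm, hr⟩, ih]
    rw [List.drop_eq_getElem_cons hj, pvRunL,
      if_pos ⟨by rw [← List.getD_eq_getElem cs ' ' hj]; exact hm, hr⟩]
  | case2 j run h =>
    rw [pvRun, dif_neg h]
    by_cases hj : j < cs.length
    · rw [List.drop_eq_getElem_cons hj, pvRunL, if_neg]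
      intro ⟨h1, h2⟩
      exact h ⟨hj, by rw [List.getD_eq_getElem cs ' ' hj]; exact h1, h2⟩
    · rw [List.drop_eq_nil_of_le (by omega), pvRunL]

theorem pvHeadD_of_drop {cs : List Char} {j : Nat} {y : Char} {tl : List Char}
    (h : cs.drop j = y :: tl) : cs.getD j ' ' = y := by
  rw [pvGetD_headD_drop, h]; rfl

theorem pvBadAt_front (cs : List Char) (i : Nat) :
    pvBadAt cs i = pvFront (cs.drop i) := by
  by_cases hi : i < cs.length
  · have hdi : cs.drop i = cs.getD i ' ' :: cs.drop (i + 1) := by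
      rw [List.drop_eq_getElem_cons hi, List.getD_eq_getElem cs ' ' hi]
    by_cases hi1 : i + 1 < cs.length
    · have hdi1 : cs.drop (i + 1) = cs.getD (i + 1) ' ' :: cs.drop (i + 2) := by
        rw [List.drop_eq_getElem_cons hi1, List.getD_eq_getElem cs ' ' hi1]
      rw [hdi, hdi1]
      simp only [pvBadAt, pvFront]
      by_cases hc : (cs.getD i ' ' = '<' ∨ cs.getD i ' ' = '>') ∨
          (cs.getD i ' ' = '^' ∨ cs.getD i ' ' = 'v')
      · rw [if_pos hc, if_pos hc]
        by_cases hm : (if cs.getD i ' ' = '<' ∨ cs.getD i ' ' = '>' then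
            cs.getD (i + 1) ' ' = '^' ∨ cs.getD (i + 1) ' ' = 'v'
          else cs.getD (i + 1) ' ' = '<' ∨ cs.getD (i + 1) ' ' = '>')
        · rw [if_pos ⟨hi1, hm⟩, if_pos hm]
          have hrd := pvRun_drop cs (cs.getD (i + 1) ' ')
            (if cs.getD i ' ' = '<' ∨ cs.getD i ' ' = '>' then 3 else 2) (i + 2) 1
          cases hres : pvRunL (cs.getD (i + 1) ' ')
              (if cs.getD i ' ' = '<' ∨ cs.getD i ' ' = '>' then 3 else 2) 1
              (cs.drop (i + 2)) with
          | nil =>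
            rw [hres] at hrd
            have hge : cs.length ≤ pvRun cs (cs.getD (i + 1) ' ')
                (if cs.getD i ' ' = '<' ∨ cs.getD i ' ' = '>' then 3 else 2) (i + 2) 1 :=
              List.drop_eq_nil_iff.mp hrd
            rw [decide_eq_false (Nat.not_lt.mpr hge), Bool.false_and]
          | cons y tl =>
            rw [hres] at hrd
            have hlt : pvRun cs (cs.getD (i + 1) ' ')
                (if cs.getD i ' ' = '<' ∨ cs.getD i ' ' = '>' then 3 else 2) (i + 2) 1 <
                cs.length := by
              by_contra hge
              rw [List.drop_eq_nil_of_le (Nat.not_lt.mp hge)] at hrd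
              simp at hrd
            rw [pvHeadD_of_drop hrd, decide_eq_true hlt, Bool.true_and]
        · rw [if_neg (by intro h; exact hm h.2), if_neg hm]
      · rw [if_neg hc, if_neg hc]
    · have hdi1 : cs.drop (i + 1) = [] := List.drop_eq_nil_of_le (by omega)
      rw [hdi, hdi1]
      have hfr : pvFront [cs.getD i ' '] = false := rfl
      rw [hfr]
      simp only [pvBadAt]
      by_cases hc : (cs.getD i ' ' = '<' ∨ cs.getD i ' ' = '>') ∨
          (cs.getD i ' ' = '^' ∨ cs.getD i ' ' = 'v')
      · rw [if_pos hc, if_neg (by intro h; omega)]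
      · rw [if_neg hc]
  · rw [List.drop_eq_nil_of_le (Nat.not_lt.mp hi)]
    have hc : cs.getD i ' ' = ' ' := List.getD_eq_default cs ' ' (Nat.not_lt.mp hi)
    simp only [pvBadAt, pvFront, hc]
    rw [if_neg (by decide)]

theorem pvScan_iff (cs : List Char) :
    ∀ i, pvScan cs i = true ↔ ∀ k, i ≤ k → k < cs.length → pvBadAt cs k = false := by
  intro i
  induction i using pvScan.induct cs with
  | case1 i hi hbad =>
    rw [pvScan, dif_pos hi, if_pos hbad]
    constructor
    · intro hf; simp at hf
    · intro hall
      have := hall i (Nat.le_refl i) hi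
      rw [hbad] at this; simp at this
  | case2 i hi hbad ih =>
    rw [pvScan, dif_pos hi, if_neg (by simp [hbad]), ih]
    constructor
    · intro hall k hk hkn
      rcases Nat.eq_or_lt_of_le hk with rfl | hlt
      · simpa using hbad
      · exact hall k hlt hkn
    · intro hall k hk hkn
      exact hall k (by omega) hkn
  | case3 i hi =>
    rw [pvScan, dif_neg hi]
    constructor
    · intro _ k hk hkn; omega
    · intro _; rfl

theorem pvRunL_decomp (m : Char) (cap : Nat) :
    ∀ (l : List Char) (run : Nat), run ≤ cap →
      ∃ k rest', run + k ≤ cap ∧ l = List.replicate k m ++ rest' ∧ pvRunL m cap run l = rest' := by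
  intro l
  induction l with
  | nil => intro run h; exact ⟨0, [], by omega, rfl, rfl⟩
  | cons x xs ih =>
    intro run h
    by_cases hx : x = m ∧ run < cap
    · obtain ⟨k, rest', hk, hdec, hres⟩ := ih (run + 1) (by omega)
      refine ⟨k + 1, rest', by omega, ?_, ?_⟩
      · simp [List.replicate_succ, hx.1, hdec]
      · simp [pvRunL, hx, hres]
    · exact ⟨0, x :: xs, by omega, rfl, by simp [pvRunL, hx]⟩

theorem pvFront_iff (t : List Char) :
    pvFront t = true ↔ ∃ p ∈ pvPatsL, p <+: t := by
  constructor
  · match t with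
    | [] => intro h; simp [pvFront] at h
    | [c] => intro h; simp [pvFront] at h
    | c :: x :: rest =>
      intro h
      simp only [pvFront] at h
      by_cases hc : (c = '<' ∨ c = '>') ∨ (c = '^' ∨ c = 'v')
      · rw [if_pos hc] at h
        by_cases h1 : c = '<' ∨ c = '>'
        · simp only [if_pos h1] at h
          by_cases hm : x = '^' ∨ x = 'v'
          · rw [if_pos hm] at h
            obtain ⟨k, rest', hk, hdec, hres⟩ := pvRunL_decomp x 3 rest 1 (by omega)
            rw [hres] at h
            cases rest' with
            | nil => simp at h
            | cons y tail =>
              simp only [decide_eq_true_eq] at h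
              subst y
              have hk' : k ≤ 2 := by omega
              refine ⟨c :: x :: List.replicate k x ++ [c], ?_, ?_⟩
              · interval_cases k <;> rcases h1 with rfl | rfl <;> rcases hm with rfl | rfl <;> decide
              · refine ⟨tail, ?_⟩
                rw [hdec]
                simp
          · rw [if_neg hm] at h; simp at h
        · have h2 : c = '^' ∨ c = 'v' := hc.resolve_left h1
          simp only [if_neg h1] at h
          by_cases hm : x = '<' ∨ x = '>'
          · rw [if_pos hm] at h
            obtain ⟨k, rest', hk, hdec, hres⟩ := pvRunL_decomp x 2 rest 1 (by omega)
            rw [hres] at h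
            cases rest' with
            | nil => simp at h
            | cons y tail =>
              simp only [decide_eq_true_eq] at h
              subst y
              have hk' : k ≤ 1 := by omega
              refine ⟨c :: x :: List.replicate k x ++ [c], ?_, ?_⟩
              · interval_cases k <;> rcases h2 with rfl | rfl <;> rcases hm with rfl | rfl <;> decide
              · refine ⟨tail, ?_⟩
                rw [hdec]
                simp
          · rw [if_neg hm] at h; simp at h
      · rw [if_neg hc] at h; simp at h
  · rintro ⟨p, hp, u, rfl⟩
    simp only [pvPatsL, List.mem_cons, List.not_mem_nil, or_false] at hp
    rcases hp with rfl | rfl | rfl | rfl | rfl | rfl | rfl | rfl | rfl | rfl | rfl | rfl | rfl |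
      rfl | rfl | rfl | rfl | rfl | rfl | rfl <;>
      simp [pvFront, pvRunL]

-- ===== VERDICT (by name: the statement is the Claim_ definition above) =====
theorem validate_instructions_spec : Claim_equal_validate_instructions := by
  intro s _
  unfold Spec_validate_instructions validate_instructions validate_instructions_alt
  rw [Bool.eq_iff_iff, pvALoop_iff, pvScan_iff]
  constructor
  · intro hA k _ _
    rw [pvBadAt_front]
    by_contra hbad
    rw [Bool.not_eq_false] at hbad
    obtain ⟨p, hp, hpre⟩ := (pvFront_iff _).mp hbad
    have hq : ∃ q ∈ pvInvalidPats, q.toList = p := by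
      rw [← pvPatsL_eq] at hp
      simpa using hp
    obtain ⟨q, hq, rfl⟩ := hq
    have hfalse := hA q hq
    have htrue : PySem.Chars.isIn q.toList s.toList = true :=
      (PySem.Chars.exists_prefix_drop_iff_isIn _ _).mp ⟨k, hpre⟩
    rw [hfalse] at htrue
    exact Bool.false_ne_true htrue
  · intro hB p hp
    rw [← Bool.not_eq_true]
    intro hin
    obtain ⟨j, hpre⟩ := (PySem.Chars.exists_prefix_drop_iff_isIn p.toList s.toList).mpr hin
    have hpL : p.toList ∈ pvPatsL := by
      rw [← pvPatsL_eq]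
      exact List.mem_map_of_mem hp
    have hne : ∀ q ∈ pvPatsL, q ≠ [] := by decide
    have hj : j < s.toList.length := by
      by_contra hge
      rw [List.drop_eq_nil_of_le (Nat.not_lt.mp hge)] at hpre
      exact hne p.toList hpL (List.prefix_nil.mp hpre)
    have hfalse := hB j (Nat.zero_le j) hj
    rw [pvBadAt_front] at hfalse
    have htrue : pvFront (s.toList.drop j) = true := (pvFront_iff _).mpr ⟨p.toList, hpL, hpre⟩
    rw [hfalse] at htrue
    exact Bool.false_ne_true htrue
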